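-- pv_equiv track=rewrite | github.com/PetcuRazvan/Programare_Evolutiva_Python | seminar1/main.py | nrColoaneCuMinimCinci
-- ===== SOURCE A (Python) =====
-- def nrColoaneCuMinimCinci(matrice):
--     latime = len(matrice[0])
--     inatime = len(matrice)
--
--     nr = 0
--
--     for j in range(latime):
--         min = matrice[0][j]
--         for i in range(inatime):
--             if matrice[i][j] < min:
--                 min = matrice[i][j]
--
--
--         if min == 5:
--             nr += 1
--
--     return nr
-- ===== SOURCE B (Python) =====
-- def nrColoaneCuMinimCinci(matrice):
--     mins = list(matrice[0])
--     for row in matrice[1:]: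
--         mins = [row[j] if row[j] < mins[j] else mins[j] for j in range(len(mins))]
--     return sum(1 for m in mins if m == 5)
-- ===== Notes on version B (the rewrite author's own statement) =====
-- stated objective: alternative
-- what changed: Replaces the column-by-column rescans (for each column an inner loop over all rows) with a single row-major pass that maintains a running array of column minima, then counts the entries equal to 5.
import Mathlib
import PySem

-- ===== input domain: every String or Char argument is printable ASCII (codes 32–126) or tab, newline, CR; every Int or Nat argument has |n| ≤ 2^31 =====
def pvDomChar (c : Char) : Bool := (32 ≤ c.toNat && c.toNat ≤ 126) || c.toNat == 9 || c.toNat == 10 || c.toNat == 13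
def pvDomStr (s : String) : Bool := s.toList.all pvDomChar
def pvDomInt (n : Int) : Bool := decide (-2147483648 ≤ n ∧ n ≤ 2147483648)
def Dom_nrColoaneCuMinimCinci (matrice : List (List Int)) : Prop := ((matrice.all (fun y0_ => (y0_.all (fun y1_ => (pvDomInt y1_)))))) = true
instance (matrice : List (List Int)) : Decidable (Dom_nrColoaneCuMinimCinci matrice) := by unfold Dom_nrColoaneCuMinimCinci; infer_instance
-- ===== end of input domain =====

-- B replaces A's column-by-column rescans with one row-major pass keeping a running array
-- of column minima, then counts entries equal to 5 (alternative traversal order).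


-- ===== PORT A =====
-- for j in range(latime): scan all rows for the column minimum, count minima equal to 5.
-- Out-of-range accesses (excluded by Pre_) are rendered with getD 0.
def nrColoaneCuMinimCinci (matrice : List (List Int)) : Int :=
  let latime := (matrice.headD []).length
  let inatime := matrice.length
  (List.range latime).foldl
    (fun nr j =>
      let m := (List.range inatime).foldl
        (fun m i =>
          if (matrice.getD i []).getD j 0 < m then (matrice.getD i []).getD j 0 else m)
        ((matrice.headD []).getD j 0)
      if m = 5 then nr + 1 else nr)
    0

-- ===== PORT B =====
-- one row update of the running minima array (the list comprehension in Source B)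
def pvRowStep (mins row : List Int) : List Int :=
  (List.range mins.length).map
    (fun j => if row.getD j 0 < mins.getD j 0 then row.getD j 0 else mins.getD j 0)

def nrColoaneCuMinimCinci_alt (matrice : List (List Int)) : Int :=
  let mins := (matrice.drop 1).foldl pvRowStep (matrice.headD [])
  mins.foldl (fun nr m => if m = 5 then nr + 1 else nr) 0

-- ===== PRECONDITION & SPEC =====
-- Pre_ excludes exactly the inputs where the Python A raises IndexError: the empty matrix
-- (matrice[0]) and ragged matrices with some row shorter than row 0 (matrice[i][j]).
def Pre_nrColoaneCuMinimCinci (matrice : List (List Int)) : Prop :=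
  matrice ≠ [] ∧ ∀ row ∈ matrice, (matrice.headD []).length ≤ row.length
instance (matrice : List (List Int)) : Decidable (Pre_nrColoaneCuMinimCinci matrice) := by
  unfold Pre_nrColoaneCuMinimCinci; infer_instance
def pvWitness_nrColoaneCuMinimCinci : List (List Int) := [[5, 1], [6, 2]]
def Spec_nrColoaneCuMinimCinci (matrice : List (List Int)) (out : Int) : Prop := out = nrColoaneCuMinimCinci_alt matrice
instance (matrice : List (List Int)) (out : Int) : Decidable (Spec_nrColoaneCuMinimCinci matrice out) := by unfold Spec_nrColoaneCuMinimCinci; infer_instance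

-- ===== CLAIM (what is proved, stated in full; the proofs are below) =====
def Claim_equal_nrColoaneCuMinimCinci : Prop := ∀ (matrice : List (List Int)), Dom_nrColoaneCuMinimCinci matrice → Pre_nrColoaneCuMinimCinci matrice → Spec_nrColoaneCuMinimCinci matrice (nrColoaneCuMinimCinci matrice)

-- ===== LEMMAS AND PROOFS =====

-- running column minimum of column j over 'rows', seeded with 'init'
def pvColMin (rows : List (List Int)) (init : Int) (j : Nat) : Int :=
  rows.foldl (fun m row => if row.getD j 0 < m then row.getD j 0 else m) init

-- a fold over range xs.length reading xs.getD is a fold over xs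
theorem pv_foldl_range_getD {α β : Type} (xs : List α) (f : β → α → β) (d : α) (init : β) :
    (List.range xs.length).foldl (fun a i => f a (xs.getD i d)) init = xs.foldl f init := by
  induction xs generalizing init with
  | nil => rfl
  | cons x xs ih =>
    simp only [List.length_cons, List.range_succ_eq_map, List.foldl_cons, List.foldl_map,
      List.getD_cons_zero, List.getD_cons_succ]
    exact ih (f init x)

theorem pv_map_range_getD (xs : List Int) :
    (List.range xs.length).map (fun j => xs.getD j 0) = xs := by
  induction xs with
  | nil => rfl
  | cons x xs ih =>
    simp only [List.length_cons, List.range_succ_eq_map, List.map_cons, List.map_map,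
      List.getD_cons_zero]
    exact congrArg (x :: ·) ih

theorem pvRowStep_length (mins row : List Int) : (pvRowStep mins row).length = mins.length := by
  simp [pvRowStep]

theorem pvRowStep_getD (mins row : List Int) (j : Nat) (hj : j < mins.length) :
    (pvRowStep mins row).getD j 0 =
      if row.getD j 0 < mins.getD j 0 then row.getD j 0 else mins.getD j 0 := by
  have hj' : j < (pvRowStep mins row).length := by rw [pvRowStep_length]; exact hj
  rw [List.getD_eq_getElem _ _ hj']
  simp [pvRowStep]

-- invariant of B's row-major pass: the minima array is pointwise pvColMin
theorem pv_B_inv (rows : List (List Int)) (mins : List Int) :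
    rows.foldl pvRowStep mins =
      (List.range mins.length).map (fun j => pvColMin rows (mins.getD j 0) j) := by
  induction rows generalizing mins with
  | nil =>
    simp only [List.foldl_nil, pvColMin, List.foldl_nil]
    exact (pv_map_range_getD mins).symm
  | cons r rows ih =>
    rw [List.foldl_cons, ih (pvRowStep mins r), pvRowStep_length]
    apply List.map_congr_left
    intro j hj
    rw [List.mem_range] at hj
    rw [pvRowStep_getD mins r j hj]
    simp only [pvColMin, List.foldl_cons]

-- seeding with the first element absorbs scanning it again
theorem pvColMin_cons_self (rows : List (List Int)) (r : List Int) (j : Nat) :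
    pvColMin (r :: rows) (r.getD j 0) j = pvColMin rows (r.getD j 0) j := by
  simp [pvColMin]

theorem pv_A_eq (matrice : List (List Int)) :
    nrColoaneCuMinimCinci matrice =
      (List.range (matrice.headD []).length).foldl
        (fun nr j => if pvColMin matrice ((matrice.headD []).getD j 0) j = 5 then nr + 1 else nr)
        0 := by
  unfold nrColoaneCuMinimCinci
  dsimp only
  refine PySem.List.foldl_congr_mem _ _ _ _ ?_
  intro nr j _
  rw [pv_foldl_range_getD matrice
    (fun m row => if row.getD j 0 < m then row.getD j 0 else m) []]
  rfl

theorem pv_B_eq (matrice : List (List Int)) :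
    nrColoaneCuMinimCinci_alt matrice =
      (List.range (matrice.headD []).length).foldl
        (fun nr j =>
          if pvColMin (matrice.drop 1) ((matrice.headD []).getD j 0) j = 5 then nr + 1 else nr)
        0 := by
  unfold nrColoaneCuMinimCinci_alt
  rw [pv_B_inv, List.foldl_map]

-- ===== VERDICT (by name: the statement is the Claim_ definition above) =====
theorem nrColoaneCuMinimCinci_spec : Claim_equal_nrColoaneCuMinimCinci := by
  intro matrice _ _
  unfold Spec_nrColoaneCuMinimCinci
  rw [pv_A_eq, pv_B_eq]
  cases matrice with
  | nil => rfl
  | cons r rows =>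
    refine PySem.List.foldl_congr_mem _ _ _ _ ?_
    intro nr j _
    simp only [List.headD_cons, List.drop_one, List.tail_cons]
    simp only [pvColMin_cons_self rows r j]
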